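-- pv_equiv track=rewrite | github.com/H6NG/NECAI | playandlearn/generate-games-from-random-fens.py | legal_start_ply_choices
-- ===== SOURCE A (Python) =====
-- def legal_start_ply_choices(color: str, min_random_plies: int, max_random_plies: int) -> list[int]:
--     expected_parity = 0 if color == "white" else 1
--     choices = [
--         ply
--         for ply in range(min_random_plies, max_random_plies + 1)
--         if ply % 2 == expected_parity
--     ]
--     if not choices:
--         raise ValueError(
--             f"No ply counts in range [{min_random_plies}, {max_random_plies}] match color={color}"
--         )
--     return choices
-- ===== SOURCE B (Python) =====
-- def legal_start_ply_choices(color: str, min_random_plies: int, max_random_plies: int) -> list[int]: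
--     parity = 0 if color == "white" else 1
--     first = min_random_plies + (parity - min_random_plies) % 2
--     count = (max_random_plies - first) // 2 + 1
--     if count <= 0:
--         raise ValueError(
--             f"No ply counts in range [{min_random_plies}, {max_random_plies}] match color={color}"
--         )
--     return [first + 2 * k for k in range(count)]
-- ===== Notes on version B (the rewrite author's own statement) =====
-- stated objective: simpler
-- what changed: Replaces the per-element parity filter over the full range with a closed-form first matching ply and match count, generating the k-th match directly as first + 2*k.
import Mathlib
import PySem

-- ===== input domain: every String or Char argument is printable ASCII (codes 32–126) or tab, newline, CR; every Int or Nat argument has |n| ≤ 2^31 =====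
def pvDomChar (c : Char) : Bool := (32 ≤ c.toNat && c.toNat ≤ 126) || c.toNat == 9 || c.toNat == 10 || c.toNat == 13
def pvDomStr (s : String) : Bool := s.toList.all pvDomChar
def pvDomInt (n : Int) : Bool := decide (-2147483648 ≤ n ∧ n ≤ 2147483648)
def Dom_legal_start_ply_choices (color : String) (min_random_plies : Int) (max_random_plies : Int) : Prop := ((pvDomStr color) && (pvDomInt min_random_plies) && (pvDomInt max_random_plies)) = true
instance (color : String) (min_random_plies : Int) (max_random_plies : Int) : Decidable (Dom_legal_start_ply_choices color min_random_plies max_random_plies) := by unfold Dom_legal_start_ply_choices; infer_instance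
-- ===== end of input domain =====

-- ===== PORT A =====
-- B replaces A's per-element parity filter over the range with a closed-form first match
-- and count, generating the k-th match directly (objective: simpler).
def legal_start_ply_choices (color : String) (min_random_plies : Int) (max_random_plies : Int) : List Int :=
  let expected_parity : Int := if color == "white" then 0 else 1
  let choices := (PySem.List.pyRange min_random_plies (max_random_plies + 1) 1).filter
    (fun ply => PySem.Int.mod ply 2 == expected_parity)
  choices

-- ===== PORT B =====
def legal_start_ply_choices_alt (color : String) (min_random_plies : Int) (max_random_plies : Int) : List Int :=
  let parity : Int := if color == "white" then 0 else 1
  let first := min_random_plies + PySem.Int.mod (parity - min_random_plies) 2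
  let count := PySem.Int.floordiv (max_random_plies - first) 2 + 1
  (PySem.List.pyRange 0 count 1).map (fun k => first + 2 * k)

-- ===== PRECONDITION & SPEC =====
-- Pre_ excludes exactly the inputs on which A raises ValueError (no ply of the expected
-- parity lies in [min_random_plies, max_random_plies]); B raises the identical error there.
def Pre_legal_start_ply_choices (color : String) (min_random_plies : Int) (max_random_plies : Int) : Prop :=
  min_random_plies + PySem.Int.mod ((if color == "white" then (0 : Int) else 1) - min_random_plies) 2
    ≤ max_random_plies
instance (color : String) (min_random_plies : Int) (max_random_plies : Int) : Decidable (Pre_legal_start_ply_choices color min_random_plies max_random_plies) := by unfold Pre_legal_start_ply_choices; infer_instance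
def pvWitness_legal_start_ply_choices : String × Int × Int := ("white", 2, 6)
def Spec_legal_start_ply_choices (color : String) (min_random_plies : Int) (max_random_plies : Int) (out : List Int) : Prop := out = legal_start_ply_choices_alt color min_random_plies max_random_plies
instance (color : String) (min_random_plies : Int) (max_random_plies : Int) (out : List Int) : Decidable (Spec_legal_start_ply_choices color min_random_plies max_random_plies out) := by unfold Spec_legal_start_ply_choices; infer_instance

-- ===== CLAIM (what is proved, stated in full; the proofs are below) =====
def Claim_equal_legal_start_ply_choices : Prop := ∀ (color : String) (min_random_plies : Int) (max_random_plies : Int), Dom_legal_start_ply_choices color min_random_plies max_random_plies → Pre_legal_start_ply_choices color min_random_plies max_random_plies → Spec_legal_start_ply_choices color min_random_plies max_random_plies (legal_start_ply_choices color min_random_plies max_random_plies)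

-- ===== LEMMAS AND PROOFS =====

theorem pymod_pos (a : Int) : PySem.Int.mod a 2 = a % 2 :=
  PySem.Int.mod_eq_emod_of_pos (by norm_num)

theorem pyRange_two_nil (a b : Int) (h : b ≤ a) : PySem.List.pyRange a b 2 = [] := by
  rw [PySem.List.pyRange_of_pos a b (by norm_num)]
  simp [show ¬ a < b by omega]

theorem pyRange_two_cons (a b : Int) (h : a < b) :
    PySem.List.pyRange a b 2 = a :: PySem.List.pyRange (a + 2) b 2 := by
  rw [PySem.List.pyRange_of_pos a b (by norm_num),
      PySem.List.pyRange_of_pos (a + 2) b (by norm_num)]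
  by_cases h2 : a + 2 < b
  · have hc : (if a < b then ((b - a + 2 - 1) / 2).toNat else 0)
        = (if a + 2 < b then ((b - (a + 2) + 2 - 1) / 2).toNat else 0) + 1 := by
      simp only [if_pos h, if_pos h2]; omega
    rw [hc, List.range_succ_eq_map]
    simp [List.map_map, Function.comp_def]
    intro k _
    ring
  · have hc : (if a < b then ((b - a + 2 - 1) / 2).toNat else 0) = 1 := by
      simp only [if_pos h]; omega
    rw [hc]
    simp [show ¬ a + 2 < b from h2]

-- A's filter of consecutive integers keeps exactly the stride-2 sequence starting at the
-- first element of the expected parity.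
theorem filter_parity_eq_stride (e : Int) (he : e = 0 ∨ e = 1) :
    ∀ (n : Nat) (a b : Int), (b - a).toNat = n →
    (PySem.List.pyRange a b 1).filter (fun p => PySem.Int.mod p 2 == e)
      = PySem.List.pyRange (if PySem.Int.mod a 2 == e then a else a + 1) b 2 := by
  intro n
  induction n with
  | zero =>
    intro a b hn
    have hba : b ≤ a := by omega
    rw [PySem.List.pyRange_one_eq_nil hba]
    have : b ≤ (if PySem.Int.mod a 2 == e then a else a + 1) := by
      split <;> omega
    rw [pyRange_two_nil _ _ this]
    simp
  | succ m ih =>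
    intro a b hn
    have hab : a < b := by omega
    rw [PySem.List.pyRange_one_cons hab, List.filter_cons]
    have hmod := pymod_pos a
    have hmod1 := pymod_pos (a + 1)
    by_cases hp : PySem.Int.mod a 2 = e
    · have h1 : ¬ PySem.Int.mod (a + 1) 2 = e := by
        rw [hmod1]; rw [hmod] at hp; omega
      rw [ih (a + 1) b (by omega)]
      simp only [hp, beq_self_eq_true, if_true, beq_iff_eq, h1, if_false]
      rw [pyRange_two_cons a b hab, show a + 1 + 1 = a + 2 by ring]
    · have h1 : PySem.Int.mod (a + 1) 2 = e := by
        rw [hmod1]; rw [hmod] at hp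
        have : a % 2 = 0 ∨ a % 2 = 1 := by omega
        rcases he with he | he <;> rcases this with h | h <;> omega
      rw [ih (a + 1) b (by omega)]
      simp only [beq_iff_eq, hp, if_false, h1, if_true]

-- B's closed-form first match equals A's "skip one if the parity is wrong".
theorem first_eq (e a : Int) (he : e = 0 ∨ e = 1) :
    a + PySem.Int.mod (e - a) 2 = if PySem.Int.mod a 2 == e then a else a + 1 := by
  have h1 := pymod_pos (e - a)
  have h2 := pymod_pos a
  by_cases hc : a % 2 = e
  · rw [if_pos (by simp [hc]), h1]; omega
  · rw [if_neg (by simp [hc]), h1]; omega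

-- A stride-2 range is the map k ↦ a + 2k over range of its closed-form length.
theorem stride_eq_map (a b : Int) :
    PySem.List.pyRange a b 2
      = (PySem.List.pyRange 0 (PySem.Int.floordiv (b - 1 - a) 2 + 1) 1).map
          (fun k => a + 2 * k) := by
  rw [PySem.List.pyRange_of_pos a b (by norm_num), PySem.List.pyRange_one,
      PySem.Int.floordiv_eq_ediv_of_pos (by norm_num : (0:Int) < 2)]
  rw [List.map_map]
  have hcnt : (if a < b then ((b - a + 2 - 1) / 2).toNat else 0)
      = ((b - 1 - a) / 2 + 1 - 0).toNat := by
    by_cases h : a < b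
    · simp only [if_pos h]; omega
    · simp only [if_neg h]; omega
  rw [hcnt]
  apply List.map_congr_left
  intro k _
  simp [Function.comp]

-- ===== VERDICT (by name: the statement is the Claim_ definition above) =====
theorem legal_start_ply_choices_spec : Claim_equal_legal_start_ply_choices := by
  intro color lo hi _ _
  unfold Spec_legal_start_ply_choices legal_start_ply_choices legal_start_ply_choices_alt
  simp only []
  rw [filter_parity_eq_stride (if color == "white" then 0 else 1)
        (by split <;> simp) (hi + 1 - lo).toNat lo (hi + 1) rfl,
      ← first_eq _ lo (by split <;> simp),
      stride_eq_map, show hi + 1 - 1 = hi by ring]
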